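-- pv_equiv track=rewrite | github.com/AlexBatrakov/wearable-analytics | src/garmin_analytics/ingest/uds.py | _deterministic_column_order
-- ===== SOURCE A (Python) =====
-- CORE_COLUMNS = [
--     "calendarDate",
--     "totalSteps",
--     "totalDistanceMeters",
--     "activeKilocalories",
--     "bmrKilocalories",
--     "totalKilocalories",
--     "restingHeartRate",
--     "minHeartRate",
--     "maxHeartRate",
-- ]
--
-- CORE_DERIVED_COLUMNS = [
--     "bodyBatteryStartOfDay",
--     "bodyBatteryEndOfDay",
--     "bodyBatteryLowest",
--     "bodyBatteryHighest",
--     "stressAwakeDurationSeconds",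
--     "stressAsleepDurationSeconds",
--     "stressTotalDurationSeconds",
-- ]
--
-- def _deterministic_column_order(columns: list[str]) -> list[str]:
--     seen: set[str] = set()
--
--     def _add(out: list[str], col: str) -> None:
--         if col in columns and col not in seen:
--             out.append(col)
--             seen.add(col)
--
--     out: list[str] = []
--     _add(out, "calendarDate")
--     for col in CORE_COLUMNS:
--         _add(out, col)
--     for col in CORE_DERIVED_COLUMNS:
--         _add(out, col)
--
--     for col in sorted(columns):
--         if col not in seen:
--             out.append(col)
--             seen.add(col)
--     return out
-- ===== SOURCE B (Python) =====
-- CORE_COLUMNS = [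
--     "calendarDate",
--     "totalSteps",
--     "totalDistanceMeters",
--     "activeKilocalories",
--     "bmrKilocalories",
--     "totalKilocalories",
--     "restingHeartRate",
--     "minHeartRate",
--     "maxHeartRate",
-- ]
--
-- CORE_DERIVED_COLUMNS = [
--     "bodyBatteryStartOfDay",
--     "bodyBatteryEndOfDay",
--     "bodyBatteryLowest",
--     "bodyBatteryHighest",
--     "stressAwakeDurationSeconds",
--     "stressAsleepDurationSeconds",
--     "stressTotalDurationSeconds",
-- ]
--
--
-- def _deterministic_column_order(columns: list[str]) -> list[str]:
--     priority = {col: i for i, col in enumerate(CORE_COLUMNS + CORE_DERIVED_COLUMNS)}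
--     n = len(priority)
--     return sorted(dict.fromkeys(columns), key=lambda c: (priority.get(c, n), c))
-- ===== Notes on version B (the rewrite author's own statement) =====
-- stated objective: simpler
-- what changed: Replaces the seen-set bookkeeping with three sequential append phases by one sorted() call over the deduplicated input, keyed by (priority index from an enumerate-built map, name).
import Mathlib
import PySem

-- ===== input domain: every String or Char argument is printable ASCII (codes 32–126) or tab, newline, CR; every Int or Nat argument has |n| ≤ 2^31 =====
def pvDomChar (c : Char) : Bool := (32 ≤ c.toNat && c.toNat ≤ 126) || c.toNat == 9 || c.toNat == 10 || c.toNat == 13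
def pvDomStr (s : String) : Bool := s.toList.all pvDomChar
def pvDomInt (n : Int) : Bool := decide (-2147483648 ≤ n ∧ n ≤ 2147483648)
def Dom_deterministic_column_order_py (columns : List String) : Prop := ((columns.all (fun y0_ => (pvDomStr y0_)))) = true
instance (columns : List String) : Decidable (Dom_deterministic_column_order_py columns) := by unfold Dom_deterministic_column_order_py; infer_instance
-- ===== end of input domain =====

-- B replaces A's seen-set bookkeeping and three append phases by one sorted() over the
-- deduplicated input keyed by (priority index, name); same return value, no speed claim.

def pvCORE_COLUMNS : List String := [
  "calendarDate",
  "totalSteps",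
  "totalDistanceMeters",
  "activeKilocalories",
  "bmrKilocalories",
  "totalKilocalories",
  "restingHeartRate",
  "minHeartRate",
  "maxHeartRate"]

def pvCORE_DERIVED_COLUMNS : List String := [
  "bodyBatteryStartOfDay",
  "bodyBatteryEndOfDay",
  "bodyBatteryLowest",
  "bodyBatteryHighest",
  "stressAwakeDurationSeconds",
  "stressAsleepDurationSeconds",
  "stressTotalDurationSeconds"]

-- ===== PORT A =====
-- the inner helper `_add(out, col)` of A, threading (out, seen)
def pvAdd (columns : List String) (st : List String × PySem.Set String) (col : String) :
    List String × PySem.Set String :=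
  if columns.contains col && !(PySem.Set.contains st.2 col) then
    (st.1 ++ [col], PySem.Set.add st.2 col)
  else st

def deterministic_column_order_py (columns : List String) : List String :=
  let st0 : List String × PySem.Set String := ([], PySem.Set.empty)
  let st1 := pvAdd columns st0 "calendarDate"
  let st2 := pvCORE_COLUMNS.foldl (pvAdd columns) st1
  let st3 := pvCORE_DERIVED_COLUMNS.foldl (pvAdd columns) st2
  let st4 := (PySem.List.sorted columns (fun c => c)).foldl
    (fun st col =>
      if PySem.Set.contains st.2 col then st
      else (st.1 ++ [col], PySem.Set.add st.2 col)) st3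
  st4.1

-- ===== PORT B =====
-- priority = {col: i for i, col in enumerate(CORE_COLUMNS + CORE_DERIVED_COLUMNS)}
def pvPriority : PySem.Dict String Int :=
  (PySem.List.enumerate (pvCORE_COLUMNS ++ pvCORE_DERIVED_COLUMNS)).foldl
    (fun d p => PySem.Dict.insert d p.2 p.1) PySem.Dict.empty

def deterministic_column_order_py_alt (columns : List String) : List String :=
  let priority := pvPriority
  let n : Int := (PySem.Dict.size priority : Int)
  PySem.List.sorted2 (PySem.List.dedup columns)
    (fun c => PySem.Dict.getD priority c n) (fun c => c)

-- ===== PRECONDITION & SPEC =====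
def Spec_deterministic_column_order_py (columns : List String) (out : List String) : Prop := out = deterministic_column_order_py_alt columns
instance (columns : List String) (out : List String) : Decidable (Spec_deterministic_column_order_py columns out) := by unfold Spec_deterministic_column_order_py; infer_instance

-- ===== CLAIM (what is proved, stated in full; the proofs are below) =====
def Claim_equal_deterministic_column_order_py : Prop := ∀ (columns : List String), Dom_deterministic_column_order_py columns → Spec_deterministic_column_order_py columns (deterministic_column_order_py columns)

-- ===== LEMMAS AND PROOFS =====

-- the 16 priority columns in order
def pvP16 : List String := pvCORE_COLUMNS ++ pvCORE_DERIVED_COLUMNS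

-- the lexicographic sort key B uses
def pvKey (c : String) : Lex (Int × String) := toLex (PySem.Dict.getD pvPriority c 16, c)

lemma pv_sorted2_eq_sorted_lex (xs : List String) :
    PySem.List.sorted2 xs (fun c => PySem.Dict.getD pvPriority c 16) (fun c => c) =
    PySem.List.sorted xs pvKey := by
  rw [PySem.List.sorted_eq_foldl_insertBy]
  show List.foldl _ [] xs = _
  apply PySem.List.foldl_congr_mem
  intro acc x _
  congr 1
  funext a b
  simp only [pvKey, Prod.Lex.toLex_lt_toLex]
  by_cases h1 : PySem.Dict.getD pvPriority a 16 < PySem.Dict.getD pvPriority b 16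
  · simp [h1]
  · by_cases h2 : PySem.Dict.getD pvPriority b 16 < PySem.Dict.getD pvPriority a 16
    · simp [h1, h2]; omega
    · have : PySem.Dict.getD pvPriority a 16 = PySem.Dict.getD pvPriority b 16 := by omega
      simp [this]

lemma pv_master (l : List String) : ∀ s : List String,
    l.foldl PySem.Set.add s = s ++ (PySem.Set.ofList l).filter (fun x => !s.contains x) := by
  induction l with
  | nil => intro s; simp [PySem.Set.ofList, PySem.Set.empty]
  | cons c l ih =>
    intro s
    have hof : PySem.Set.ofList (c :: l) = c :: (PySem.Set.ofList l).filter (fun x => !([c].contains x)) := by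
      show List.foldl _ _ _ = _
      rw [List.foldl_cons, ih]
      simp only [PySem.Set.add, PySem.Set.contains, PySem.Set.empty, List.contains_nil, Bool.false_eq_true, if_false, List.nil_append, List.singleton_append]
    rw [List.foldl_cons, ih, hof]
    by_cases hc : s.contains c
    · have hadd : PySem.Set.add s c = s := by simp only [PySem.Set.add, PySem.Set.contains, hc, if_true]
      rw [hadd]
      simp only [List.filter_cons, hc, Bool.not_true]
      congr 1
      rw [List.filter_filter]
      apply List.filter_congr
      intro x _
      by_cases hxc : x = c
      · subst hxc; simp only [List.contains_iff_mem] at hc; simp [hc]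
      · simp [hxc]
    · have hadd : PySem.Set.add s c = s ++ [c] := by simp only [PySem.Set.add, PySem.Set.contains, hc, Bool.false_eq_true, if_false]
      rw [hadd]
      simp only [List.filter_cons, hc, Bool.not_false, List.append_assoc, List.cons_append,
        List.nil_append, List.filter_filter]
      congr 2
      apply List.filter_congr
      intro x _
      by_cases hxc : x = c
      · subst hxc; simp only [List.contains_iff_mem] at hc; simp [hc]
      · simp [hxc, Bool.and_comm]

lemma pv_ofList_nodup (l : List String) (h : l.Nodup) : PySem.Set.ofList l = l := by
  induction l with
  | nil => rfl
  | cons c l ih =>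
    have hof : PySem.Set.ofList (c :: l) = c :: (PySem.Set.ofList l).filter (fun x => !([c].contains x)) := by
      show List.foldl _ _ _ = _
      rw [List.foldl_cons, pv_master]
      simp only [PySem.Set.add, PySem.Set.contains, PySem.Set.empty, List.contains_nil, Bool.false_eq_true, if_false, List.nil_append, List.singleton_append]
    rw [hof, ih h.of_cons]
    have : l.filter (fun x => !([c].contains x)) = l := by
      apply List.filter_eq_self.2
      intro x hx
      have : x ≠ c := fun e => (List.nodup_cons.1 h).1 (e ▸ hx)
      simp [this]
    rw [this]

lemma pv_ofList_sublist (l : List String) : (PySem.Set.ofList l).Sublist l := by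
  have key : ∀ (l s : List String), (l.foldl PySem.Set.add s).Sublist (s ++ l) := by
    intro l
    induction l with
    | nil => intro s; simp
    | cons c l ih =>
      intro s
      rw [List.foldl_cons]
      refine (ih _).trans ?_
      by_cases hc : s.contains c
      · have : PySem.Set.add s c = s := by simp only [PySem.Set.add, PySem.Set.contains, hc, if_true]
        rw [this]
        exact List.Sublist.append_left (List.sublist_cons_self c l) s
      · have : PySem.Set.add s c = s ++ [c] := by simp only [PySem.Set.add, PySem.Set.contains, hc, Bool.false_eq_true, if_false]
        rw [this, List.append_assoc]
        simp
  simpa using key l []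

lemma pv_G1 (cols : List String) (ps : List String) : ∀ (out seen : List String),
    (∀ x : String, seen.contains x = out.contains x) →
    (ps.foldl (pvAdd cols) (out, seen)) =
      ((ps.filter (fun c => cols.contains c)).foldl PySem.Set.add out,
       (ps.filter (fun c => cols.contains c)).foldl PySem.Set.add seen) := by
  induction ps with
  | nil => intro out seen h; simp
  | cons c ps ih =>
    intro out seen h
    rw [List.foldl_cons, List.filter_cons]
    by_cases hcol : cols.contains c
    · have hpv : pvAdd cols (out, seen) c =
          (PySem.Set.add out c, PySem.Set.add seen c) := by
        simp only [pvAdd, PySem.Set.contains, hcol, Bool.true_and, PySem.Set.add, h c]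
        by_cases ho : out.contains c <;>
          [skip; skip] <;> (simp only [List.contains_iff_mem] at ho; simp [ho])
      simp only [hcol, if_true, List.foldl_cons, hpv]
      apply ih
      intro x
      simp only [PySem.Set.add, PySem.Set.contains, h c]
      have h' : ∀ y, y ∈ seen ↔ y ∈ out := by
        intro y; rw [← List.contains_iff_mem, ← List.contains_iff_mem, h y]
      by_cases ho : out.contains c <;>
        (have ho' := ho; simp only [List.contains_iff_mem] at ho') <;>
        simp [ho', h']
    · have hpv : pvAdd cols (out, seen) c = (out, seen) := by
        simp only [pvAdd, hcol, Bool.false_and, Bool.false_eq_true, if_false]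
      simp only [hcol, Bool.false_eq_true, if_false, hpv]
      exact ih out seen h

lemma pv_A_eq (cols : List String) :
    deterministic_column_order_py cols =
      PySem.Set.ofList ((("calendarDate" :: pvP16).filter (fun c => cols.contains c)) ++
        PySem.List.sorted cols (fun c => c)) := by
  show (List.foldl _ (List.foldl _ (List.foldl _ (pvAdd cols ([], PySem.Set.empty) "calendarDate") pvCORE_COLUMNS) pvCORE_DERIVED_COLUMNS) (PySem.List.sorted cols (fun c => c))).1 = _
  have hstep : ∀ st : List String × PySem.Set String,
      List.foldl (fun (st : List String × PySem.Set String) col =>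
        if PySem.Set.contains st.2 col then st
        else (st.1 ++ [col], PySem.Set.add st.2 col)) st (PySem.List.sorted cols (fun c => c)) =
      List.foldl (pvAdd cols) st (PySem.List.sorted cols (fun c => c)) := by
    intro st
    apply PySem.List.foldl_congr_mem
    intro acc x hx
    have : cols.contains x := List.contains_iff_mem.mpr ((PySem.List.mem_sorted _ _ _ _).1 hx)
    simp only [pvAdd, this, Bool.true_and]
    by_cases hs : PySem.Set.contains acc.2 x
    · simp
    · simp
  rw [hstep]
  have hcal : pvAdd cols ([], PySem.Set.empty) "calendarDate" =
      List.foldl (pvAdd cols) ([], PySem.Set.empty) ["calendarDate"] := by simp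
  rw [hcal, ← List.foldl_append, ← List.foldl_append, ← List.foldl_append]
  have : (["calendarDate"] ++ (pvCORE_COLUMNS ++ (pvCORE_DERIVED_COLUMNS ++ PySem.List.sorted cols (fun c => c)))) =
      (("calendarDate" :: pvP16) ++ PySem.List.sorted cols (fun c => c)) := by
    simp [pvP16]
  rw [this, show (([], PySem.Set.empty) : List String × PySem.Set String) = (([] : List String), ([] : List String)) from rfl,
    pv_G1 cols _ [] [] (fun x => rfl)]
  rw [List.filter_append]
  have hS : (PySem.List.sorted cols (fun c => c)).filter (fun c => cols.contains c) =
      PySem.List.sorted cols (fun c => c) := by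
    apply List.filter_eq_self.2
    intro x hx
    exact List.contains_iff_mem.mpr ((PySem.List.mem_sorted _ _ _ _).1 hx)
  rw [PySem.Set.ofList_eq_foldl, hS]

lemma pv_items : pvPriority = (⟨[("calendarDate",0),("totalSteps",1),("totalDistanceMeters",2),
  ("activeKilocalories",3),("bmrKilocalories",4),("totalKilocalories",5),("restingHeartRate",6),
  ("minHeartRate",7),("maxHeartRate",8),("bodyBatteryStartOfDay",9),("bodyBatteryEndOfDay",10),
  ("bodyBatteryLowest",11),("bodyBatteryHighest",12),("stressAwakeDurationSeconds",13),
  ("stressAsleepDurationSeconds",14),("stressTotalDurationSeconds",15)]⟩ : PySem.Dict String Int) := by decide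

lemma pv_K16 (x : String) (h : x ∉ pvP16) : PySem.Dict.getD pvPriority x 16 = 16 := by
  simp only [pvP16, pvCORE_COLUMNS, pvCORE_DERIVED_COLUMNS, List.cons_append,
    List.nil_append, List.mem_cons, List.not_mem_nil, or_false, not_or] at h
  obtain ⟨h1, h2, h3, h4, h5, h6, h7, h8, h9, h10, h11, h12, h13, h14, h15, h16⟩ := h
  rw [pv_items]
  have e1 : ("calendarDate" == x) = false := beq_eq_false_iff_ne.mpr (Ne.symm h1)
  have e2 : ("totalSteps" == x) = false := beq_eq_false_iff_ne.mpr (Ne.symm h2)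
  have e3 : ("totalDistanceMeters" == x) = false := beq_eq_false_iff_ne.mpr (Ne.symm h3)
  have e4 : ("activeKilocalories" == x) = false := beq_eq_false_iff_ne.mpr (Ne.symm h4)
  have e5 : ("bmrKilocalories" == x) = false := beq_eq_false_iff_ne.mpr (Ne.symm h5)
  have e6 : ("totalKilocalories" == x) = false := beq_eq_false_iff_ne.mpr (Ne.symm h6)
  have e7 : ("restingHeartRate" == x) = false := beq_eq_false_iff_ne.mpr (Ne.symm h7)
  have e8 : ("minHeartRate" == x) = false := beq_eq_false_iff_ne.mpr (Ne.symm h8)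
  have e9 : ("maxHeartRate" == x) = false := beq_eq_false_iff_ne.mpr (Ne.symm h9)
  have e10 : ("bodyBatteryStartOfDay" == x) = false := beq_eq_false_iff_ne.mpr (Ne.symm h10)
  have e11 : ("bodyBatteryEndOfDay" == x) = false := beq_eq_false_iff_ne.mpr (Ne.symm h11)
  have e12 : ("bodyBatteryLowest" == x) = false := beq_eq_false_iff_ne.mpr (Ne.symm h12)
  have e13 : ("bodyBatteryHighest" == x) = false := beq_eq_false_iff_ne.mpr (Ne.symm h13)
  have e14 : ("stressAwakeDurationSeconds" == x) = false := beq_eq_false_iff_ne.mpr (Ne.symm h14)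
  have e15 : ("stressAsleepDurationSeconds" == x) = false := beq_eq_false_iff_ne.mpr (Ne.symm h15)
  have e16 : ("stressTotalDurationSeconds" == x) = false := beq_eq_false_iff_ne.mpr (Ne.symm h16)
  simp [PySem.Dict.getD, PySem.Dict.get?, List.find?, e1, e2, e3, e4, e5, e6, e7, e8,
    e9, e10, e11, e12, e13, e14, e15, e16]

lemma pv_ofList_cons (c : String) (l : List String) :
    PySem.Set.ofList (c :: l) = c :: (PySem.Set.ofList l).filter (fun x => !([c].contains x)) := by
  show List.foldl _ _ _ = _
  rw [List.foldl_cons, pv_master]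
  simp only [PySem.Set.add, PySem.Set.contains, PySem.Set.empty, List.contains_nil,
    Bool.false_eq_true, if_false, List.nil_append, List.singleton_append]

lemma pv_P16_nodup : pvP16.Nodup := by decide

lemma pv_N (cols : List String) :
    PySem.Set.ofList (("calendarDate" :: pvP16).filter (fun c => cols.contains c)) =
      pvP16.filter (fun c => cols.contains c) := by
  have hnodup : (pvP16.filter (fun c => cols.contains c)).Nodup := pv_P16_nodup.filter _
  by_cases hc : cols.contains "calendarDate"
  · rw [List.filter_cons_of_pos hc]
    rw [show pvP16 = "calendarDate" ::
      ("totalSteps" :: "totalDistanceMeters" :: "activeKilocalories" :: "bmrKilocalories" ::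
       "totalKilocalories" :: "restingHeartRate" :: "minHeartRate" :: "maxHeartRate" ::
       pvCORE_DERIVED_COLUMNS) from rfl]
    rw [List.filter_cons_of_pos hc]
    set t := ("totalSteps" :: "totalDistanceMeters" :: "activeKilocalories" :: "bmrKilocalories" ::
       "totalKilocalories" :: "restingHeartRate" :: "minHeartRate" :: "maxHeartRate" ::
       pvCORE_DERIVED_COLUMNS).filter (fun c => cols.contains c) with ht
    have hnt : t.Nodup := by
      apply List.Nodup.filter
      have := pv_P16_nodup
      rw [show pvP16 = "calendarDate" ::
        ("totalSteps" :: "totalDistanceMeters" :: "activeKilocalories" :: "bmrKilocalories" ::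
         "totalKilocalories" :: "restingHeartRate" :: "minHeartRate" :: "maxHeartRate" ::
         pvCORE_DERIVED_COLUMNS) from rfl] at this
      exact this.of_cons
    have hcal_t : "calendarDate" ∉ t := by
      intro hmem
      have : ("calendarDate" : String) ∈ ("totalSteps" :: "totalDistanceMeters" ::
        "activeKilocalories" :: "bmrKilocalories" :: "totalKilocalories" :: "restingHeartRate" ::
        "minHeartRate" :: "maxHeartRate" :: pvCORE_DERIVED_COLUMNS) := (List.mem_filter.1 (ht ▸ hmem)).1
      revert this; decide
    rw [pv_ofList_cons, pv_ofList_cons, pv_ofList_nodup t hnt]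
    congr 1
    rw [List.filter_cons]
    simp only [List.contains_cons, List.contains_nil, BEq.rfl, Bool.true_or, Bool.not_true,
      Bool.false_eq_true, if_false, List.filter_filter]
    apply List.filter_eq_self.2
    intro x hx
    have hne : x ≠ "calendarDate" := fun e => hcal_t (e ▸ hx)
    simp [hne]
  · rw [List.filter_cons_of_neg (by simpa using hc)]
    exact pv_ofList_nodup _ hnodup

-- ===== VERDICT (by name: the statement is the Claim_ definition above) =====
theorem deterministic_column_order_py_spec : Claim_equal_deterministic_column_order_py := by
  intro cols _
  unfold Spec_deterministic_column_order_py
  -- B's side: one lexicographic sort of the deduplicated input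
  have halt : deterministic_column_order_py_alt cols =
      PySem.List.sorted (PySem.Set.ofList cols) pvKey := by
    show PySem.List.sorted2 (PySem.List.dedup cols)
        (fun c => PySem.Dict.getD pvPriority c ((PySem.Dict.size pvPriority : Int))) (fun c => c) = _
    rw [show ((PySem.Dict.size pvPriority : Int)) = 16 from by decide,
      pv_sorted2_eq_sorted_lex, PySem.List.dedup_eq_ofList]
  rw [halt]
  -- A's side: priority block ++ alphabetical remainder
  set Q := pvP16.filter (fun c => cols.contains c) with hQ
  set S := PySem.List.sorted cols (fun c => c) with hS
  set R := (PySem.Set.ofList S).filter (fun x => !Q.contains x) with hR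
  have hA : deterministic_column_order_py cols = Q ++ R := by
    rw [pv_A_eq, PySem.Set.ofList_eq_foldl, List.foldl_append, ← PySem.Set.ofList_eq_foldl,
      pv_master, pv_N]
  rw [hA]
  -- facts about Q and R
  have hQmem : ∀ x ∈ Q, x ∈ pvP16 ∧ x ∈ cols := by
    intro x hx
    have := List.mem_filter.1 hx
    exact ⟨this.1, List.contains_iff_mem.1 this.2⟩
  have hRmem : ∀ x ∈ R, x ∈ cols ∧ x ∉ pvP16 := by
    intro x hx
    have h1 := List.mem_filter.1 hx
    have hxcols : x ∈ cols := (PySem.List.mem_sorted _ _ _ _).1 ((PySem.Set.mem_ofList _ _).1 h1.1)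
    refine ⟨hxcols, fun hx16 => ?_⟩
    have : x ∈ Q := List.mem_filter.2 ⟨hx16, List.contains_iff_mem.2 hxcols⟩
    have := h1.2
    simp at this
    exact this ‹x ∈ Q›
  have hQnodup : Q.Nodup := pv_P16_nodup.filter _
  have hRnodup : R.Nodup := (PySem.Set.nodup_ofList _).filter _
  have hdisj : Q.Disjoint R := by
    intro a haQ haR
    exact (hRmem a haR).2 (hQmem a haQ).1
  -- the two sides are the same strictly key-sorted arrangement
  refine (PySem.List.sorted_eq_of_perm_of_pairwise_lt _ _ _ ?_ ?_).symm
  · rw [List.perm_ext_iff_of_nodup (hQnodup.append hRnodup hdisj) (PySem.Set.nodup_ofList _)]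
    intro a
    rw [List.mem_append, PySem.Set.mem_ofList]
    constructor
    · rintro (h | h)
      · exact (hQmem a h).2
      · exact (hRmem a h).1
    · intro ha
      by_cases haQ : a ∈ Q
      · exact Or.inl haQ
      · refine Or.inr (List.mem_filter.2 ⟨?_, ?_⟩)
        · exact (PySem.Set.mem_ofList _ _).2 ((PySem.List.mem_sorted _ _ _ _).2 ha)
        · simp [haQ]
  · rw [List.pairwise_append]
    refine ⟨?_, ?_, ?_⟩
    · exact List.Pairwise.sublist List.filter_sublist (by decide)
    · have hle : (PySem.Set.ofList S).Pairwise (fun a b => a ≤ b) :=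
        List.Pairwise.sublist (pv_ofList_sublist S) (PySem.List.sorted_pairwise cols (fun c => c))
      have hne : (PySem.Set.ofList S).Pairwise (fun a b : String => a ≠ b) :=
        PySem.Set.nodup_ofList S
      have hlt : R.Pairwise (fun a b : String => a < b) :=
        List.Pairwise.sublist List.filter_sublist
          ((hle.and hne).imp (fun h => lt_of_le_of_ne h.1 h.2))
      refine hlt.imp_of_mem (fun {a b} ha hb hab => ?_)
      rw [pvKey, pvKey, pv_K16 a (hRmem a ha).2, pv_K16 b (hRmem b hb).2,
        Prod.Lex.toLex_lt_toLex]
      exact Or.inr ⟨rfl, hab⟩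
    · intro a haQ b hbR
      have h16 : ∀ c ∈ pvP16, PySem.Dict.getD pvPriority c 16 < 16 := by decide
      rw [pvKey, pvKey, pv_K16 b (hRmem b hbR).2, Prod.Lex.toLex_lt_toLex]
      exact Or.inl (h16 a (hQmem a haQ).1)
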